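-- pv_equiv track=rewrite | github.com/kiri3L/cloud_computing | task1.py | my_alpha_counter
-- ===== SOURCE A (Python) =====
-- def my_alpha_counter(arr):
--     if len(arr) == 0:
--         return None
--     if len(arr) == 1:
--         return {arr[0][0]: len(arr[0])}
--     d = my_alpha_counter(arr[1:])
--     d[arr[0][0]] = max(d.get(arr[0][0]) or 0, len(arr[0]))
--     return d
-- ===== SOURCE B (Python) =====
-- def my_alpha_counter(arr):
--     if not arr:
--         return None
--     d = {}
--     for s in reversed(arr):
--         d[s[0]] = max(d.get(s[0], 0), len(s))
--     return d
-- ===== Notes on version B (the rewrite author's own statement) =====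
-- stated objective: faster
-- what changed: Replaces the O(n^2) tail recursion (slicing arr[1:] at every level) with a single iterative pass over reversed(arr) building the same dict with d.get(k,0)/max; the reversed traversal reproduces A's key insertion order exactly.
-- outside the precondition, e.g. on my_alpha_counter(['ab', '']): A raises IndexError, B raises IndexError
import Mathlib
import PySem

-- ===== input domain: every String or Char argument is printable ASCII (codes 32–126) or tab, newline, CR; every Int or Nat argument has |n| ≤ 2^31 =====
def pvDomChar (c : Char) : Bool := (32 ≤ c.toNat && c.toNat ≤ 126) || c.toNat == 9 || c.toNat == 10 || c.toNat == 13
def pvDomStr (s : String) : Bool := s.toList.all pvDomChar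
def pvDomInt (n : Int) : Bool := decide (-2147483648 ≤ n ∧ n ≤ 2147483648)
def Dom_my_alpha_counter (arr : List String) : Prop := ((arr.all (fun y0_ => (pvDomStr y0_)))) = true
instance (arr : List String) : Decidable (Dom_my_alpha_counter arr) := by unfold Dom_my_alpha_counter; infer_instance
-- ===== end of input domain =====

-- B replaces A's O(n^2) tail recursion (slicing arr[1:] each level) by a single
-- iterative pass over reversed(arr) building the same dict; return value only.

-- ===== PORT A =====
-- s[0] for a string s; exact when s ≠ "" (empty strings raise IndexError in Python and are excluded by Pre_)
def pvKey (s : String) : String := String.ofList (((PySem.Str.pyGet? s 0).map (fun c => [c])).getD [])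

-- recursion of A, returning the dict; values stored are lengths ≥ 1 inside Pre_, so
-- Python's `d.get(k) or 0` is exactly `(d.get? k).getD 0` there
def pvArec : List String → Option (PySem.Dict String Int)
  | [] => none
  | s :: rest =>
    if rest = [] then
      some (PySem.Dict.empty.insert (pvKey s) (PySem.Str.len s))
    else
      match pvArec rest with
      | none => none
      | some d => some (d.insert (pvKey s) (max ((d.get? (pvKey s)).getD 0) (PySem.Str.len s)))

def my_alpha_counter (arr : List String) : Option (List (String × Int)) :=
  (pvArec arr).map (fun d => d.items)

-- ===== PORT B =====
def my_alpha_counter_alt (arr : List String) : Option (List (String × Int)) :=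
  if arr = [] then none
  else
    some ((arr.reverse.foldl
      (fun d s => d.insert (pvKey s) (max (d.getD (pvKey s) 0) (PySem.Str.len s)))
      PySem.Dict.empty).items)

-- ===== PRECONDITION & SPEC =====
-- Pre_ excludes lists containing an empty string: there Python A (and B) raise IndexError on s[0].
def Pre_my_alpha_counter (arr : List String) : Prop := ∀ s ∈ arr, s ≠ ""
instance (arr : List String) : Decidable (Pre_my_alpha_counter arr) := by unfold Pre_my_alpha_counter; infer_instance
def pvWitness_my_alpha_counter : List String := ["ab", "b", "apple"]

def Spec_my_alpha_counter (arr : List String) (out : Option (List (String × Int))) : Prop := out = my_alpha_counter_alt arr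
instance (arr : List String) (out : Option (List (String × Int))) : Decidable (Spec_my_alpha_counter arr out) := by unfold Spec_my_alpha_counter; infer_instance

-- ===== CLAIM (what is proved, stated in full; the proofs are below) =====
def Claim_equal_my_alpha_counter : Prop := ∀ (arr : List String), Dom_my_alpha_counter arr → Pre_my_alpha_counter arr → Spec_my_alpha_counter arr (my_alpha_counter arr)

-- ===== LEMMAS AND PROOFS =====
-- the loop body of B
def pvStep (d : PySem.Dict String Int) (s : String) : PySem.Dict String Int :=
  d.insert (pvKey s) (max (d.getD (pvKey s) 0) (PySem.Str.len s))

theorem pvArec_eq_foldl (arr : List String) (h : arr ≠ []) :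
    pvArec arr = some (arr.reverse.foldl pvStep PySem.Dict.empty) := by
  induction arr with
  | nil => exact absurd rfl h
  | cons s rest ih =>
    cases rest with
    | nil =>
      simp [pvArec, pvStep, PySem.Dict.getD_empty]
    | cons t ts =>
      have hne : t :: ts ≠ [] := by simp
      have hA : pvArec (s :: t :: ts) =
          match pvArec (t :: ts) with
          | none => none
          | some d => some (d.insert (pvKey s) (max ((d.get? (pvKey s)).getD 0) (PySem.Str.len s))) := rfl
      rw [hA, ih hne]
      simp [List.reverse_cons, List.foldl_append, pvStep, PySem.Dict.getD_eq_get?_getD]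

-- ===== VERDICT (by name: the statement is the Claim_ definition above) =====
theorem my_alpha_counter_spec : Claim_equal_my_alpha_counter := by
  intro arr _ _
  unfold Spec_my_alpha_counter my_alpha_counter my_alpha_counter_alt
  by_cases h : arr = []
  · subst h; simp [pvArec]
  · rw [pvArec_eq_foldl arr h]
    simp [if_neg h, pvStep]
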